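-- pv_equiv track=rewrite | github.com/HU-ICT-LAB/NanoleafWall | menu.py | find_row_number
-- ===== SOURCE A (Python) =====
-- def find_row_number(tileID):
--   found = False
--   row_number = 1
--   up_border_tile2 = [1, 2, 3, 4, 5, 6]
--   while found == False:
--     if up_border_tile2.count(tileID) == 1:
--       return row_number
--     else:
--       row_number += 1
--       tileID -= 6
-- ===== SOURCE B (Python) =====
-- def find_row_number(tileID):
--     return (tileID - 1) // 6 + 1
-- ===== Notes on version B (the rewrite author's own statement) =====
-- stated objective: faster
-- what changed: replaces the subtract-6 loop with one floor-division formula (tileID-1)//6 + 1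
-- outside the precondition, e.g. on find_row_number(0): A does not finish within the time limit, B returns 0
import Mathlib
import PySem

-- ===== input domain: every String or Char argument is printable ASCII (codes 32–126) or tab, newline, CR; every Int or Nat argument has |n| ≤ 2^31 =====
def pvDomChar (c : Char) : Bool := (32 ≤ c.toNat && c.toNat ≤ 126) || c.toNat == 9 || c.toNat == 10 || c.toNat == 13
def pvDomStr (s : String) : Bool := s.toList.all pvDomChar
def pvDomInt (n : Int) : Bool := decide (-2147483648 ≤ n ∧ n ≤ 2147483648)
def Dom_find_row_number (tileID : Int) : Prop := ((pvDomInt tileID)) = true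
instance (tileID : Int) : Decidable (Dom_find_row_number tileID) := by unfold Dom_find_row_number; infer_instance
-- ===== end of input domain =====

-- ===== PORT A =====
-- literal port of A's while loop: count over [1..6], subtract 6, bump row.
-- The non-positive guard only makes the recursion total where the Python loop diverges
-- (outside Pre_); on Pre_ it is never taken.
def find_row_number_loop (tileID row_number : Int) : Int :=
  if ([(1:Int), 2, 3, 4, 5, 6].count tileID) = 1 then row_number
  else if tileID ≤ 0 then 0
  else find_row_number_loop (tileID - 6) (row_number + 1)
termination_by tileID.toNat
decreasing_by
  simp_all [List.count]

def find_row_number (tileID : Int) : Int := find_row_number_loop tileID 1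

-- ===== PORT B =====
-- B makes find_row_number O(1): one floor division instead of the subtract-6 loop.
def find_row_number_alt (tileID : Int) : Int := PySem.Int.floordiv (tileID - 1) 6 + 1

-- ===== PRECONDITION & SPEC =====
-- A's while loop never terminates for non-positive ids (it only stops once the decremented id lands among the six first-row ids); Pre_ excludes exactly those non-positive ids.
def Pre_find_row_number (tileID : Int) : Prop := 1 ≤ tileID
instance (tileID : Int) : Decidable (Pre_find_row_number tileID) := by unfold Pre_find_row_number; infer_instance
def pvWitness_find_row_number : Int := (7)
def Spec_find_row_number (tileID : Int) (out : Int) : Prop := out = find_row_number_alt tileID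
instance (tileID : Int) (out : Int) : Decidable (Spec_find_row_number tileID out) := by unfold Spec_find_row_number; infer_instance

-- ===== CLAIM =====
def Claim_equal_find_row_number : Prop := ∀ (tileID : Int), Dom_find_row_number tileID → Pre_find_row_number tileID → Spec_find_row_number tileID (find_row_number tileID)

-- ===== LEMMAS AND PROOFS =====
theorem find_row_number_loop_eq (n : Nat) (tileID row : Int) (h1 : 1 ≤ tileID)
    (hn : tileID.toNat ≤ n) :
    find_row_number_loop tileID row = PySem.Int.floordiv (tileID - 1) 6 + row := by
  induction n generalizing tileID row with
  | zero => omega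
  | succ n ih =>
    have hc : (([(1:Int), 2, 3, 4, 5, 6].count tileID) = 1) ↔ (1 ≤ tileID ∧ tileID ≤ 6) := by
      simp [List.count_cons]
      split_ifs <;> omega
    unfold find_row_number_loop
    by_cases h : ([(1:Int), 2, 3, 4, 5, 6].count tileID) = 1
    · rw [if_pos h]
      rw [PySem.Int.floordiv_eq_ediv_of_pos (by omega)]
      have ht := hc.mp h
      omega
    · have ht : ¬ (1 ≤ tileID ∧ tileID ≤ 6) := fun hx => h (hc.mpr hx)
      rw [if_neg h, if_neg (by omega), ih (tileID - 6) (row + 1) (by omega) (by omega)]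
      rw [PySem.Int.floordiv_eq_ediv_of_pos (by omega), PySem.Int.floordiv_eq_ediv_of_pos (by omega)]
      omega

-- ===== VERDICT =====
theorem find_row_number_spec : Claim_equal_find_row_number := by
  intro tileID _ hpre
  unfold Spec_find_row_number find_row_number find_row_number_alt
  exact find_row_number_loop_eq tileID.toNat tileID 1 hpre le_rfl
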